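-- pv_equiv track=rewrite | github.com/gauravkucheriya/OrderChromatic | single file.py | req
-- ===== SOURCE A (Python) =====
-- def req(edges, n, colors):
--     req1 = []
--     req2 = []
--     for i in range(len(edges)-1):
--         x, y = edges[i]
--         z, w = edges[i+1]
--         if colors[x] < 0:
--             x, y = y, x
--         if colors[z] < 0:
--             z, w = w, z
--         if x == z:
--             req2.append((y,w))
--         else:
--             req1.append((x,z))
--     return req1, req2
-- ===== SOURCE B (Python) =====
-- def req(edges, n, colors):
--     # Run-length grouping: orient each edge once while collecting maximal runs of
--     # equal oriented heads (a head plus the list of tails in that run); req1 is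
--     # read off consecutive run heads, req2 off consecutive tails within each run.
--     if len(edges) < 2:
--         return [], []
--     runs = []  # list of (head, [tails])
--     for x, y in edges:
--         h, t = (y, x) if colors[x] < 0 else (x, y)
--         if runs and runs[-1][0] == h:
--             runs[-1][1].append(t)
--         else:
--             runs.append((h, [t]))
--     req1 = [(runs[i][0], runs[i + 1][0]) for i in range(len(runs) - 1)]
--     req2 = [(ts[j], ts[j + 1]) for _, ts in runs for j in range(len(ts) - 1)]
--     return req1, req2
-- ===== Notes on version B (the rewrite author's own statement) =====
-- stated objective: alternative
-- what changed: A classifies each consecutive edge pair in one fused loop, re-orienting every edge twice; B instead builds a run-length grouping of the oriented edges (maximal runs of equal heads with their tail lists) and reads req1 off consecutive run heads and req2 off consecutive tails inside each run, guarding len<2 so colors is never touched there, like A.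
import Mathlib
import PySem

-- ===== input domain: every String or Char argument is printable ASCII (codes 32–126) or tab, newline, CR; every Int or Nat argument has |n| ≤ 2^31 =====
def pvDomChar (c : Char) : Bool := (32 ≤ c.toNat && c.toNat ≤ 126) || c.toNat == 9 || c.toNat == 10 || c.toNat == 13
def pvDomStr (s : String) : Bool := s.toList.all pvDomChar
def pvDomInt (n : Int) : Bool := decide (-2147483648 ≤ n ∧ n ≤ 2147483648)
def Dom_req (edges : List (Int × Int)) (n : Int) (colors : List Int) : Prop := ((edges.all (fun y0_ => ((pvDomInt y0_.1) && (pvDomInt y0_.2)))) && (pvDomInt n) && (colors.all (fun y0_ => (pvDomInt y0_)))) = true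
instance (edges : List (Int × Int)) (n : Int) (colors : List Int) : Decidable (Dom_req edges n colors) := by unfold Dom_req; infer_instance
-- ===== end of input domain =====

-- B replaces A's fused pair-classifying loop by a run-length grouping of the oriented
-- edges (runs of equal heads with their tails), an alternative of the same cost.

-- ===== PORT A =====
-- 'for i in range(len(edges)-1)': indices 0..len-2 (range(-1) is empty, as is
-- List.range (0-1)); edges[i], edges[i+1] are always in range so the getD default is
-- never read; colors[x] is pyGetD (Python-exact under Pre_req's InRange).
def req (edges : List (Int × Int)) (n : Int) (colors : List Int) : (List (Int × Int)) × (List (Int × Int)) :=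
  (List.range (edges.length - 1)).foldl
    (fun acc i =>
      let e1 := edges.getD i (0, 0)
      let e2 := edges.getD (i + 1) (0, 0)
      let xy := if PySem.List.pyGetD colors e1.1 0 < 0 then (e1.2, e1.1) else e1
      let zw := if PySem.List.pyGetD colors e2.1 0 < 0 then (e2.2, e2.1) else e2
      if xy.1 == zw.1 then (acc.1, acc.2 ++ [(xy.2, zw.2)])
      else (acc.1 ++ [(xy.1, zw.1)], acc.2))
    ([], [])

-- ===== PORT B =====
-- 'runs and runs[-1][0] == h' is the getLast? match; 'runs[-1][1].append(t)' rewrites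
-- the last run in place (dropLast ++ updated last); the two comprehensions read runs
-- and each tail list by index exactly as Source B does.
def req_alt (edges : List (Int × Int)) (n : Int) (colors : List Int) : (List (Int × Int)) × (List (Int × Int)) :=
  if edges.length < 2 then ([], [])
  else
    let runs := edges.foldl
      (fun runs p =>
        let ht := if PySem.List.pyGetD colors p.1 0 < 0 then (p.2, p.1) else p
        match runs.getLast? with
        | some last =>
            if last.1 == ht.1 then runs.dropLast ++ [(last.1, last.2 ++ [ht.2])]
            else runs ++ [(ht.1, [ht.2])]
        | none => [(ht.1, [ht.2])])
      ([] : List (Int × List Int))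
    ((List.range (runs.length - 1)).map
        (fun i => ((runs.getD i (0, [])).1, (runs.getD (i + 1) (0, [])).1)),
     runs.flatMap
        (fun r => (List.range (r.2.length - 1)).map
          (fun j => (r.2.getD j 0, r.2.getD (j + 1) 0))))

-- ===== PRECONDITION & SPEC =====
-- Exactly where Python A returns: with ≥ 2 edges every edge's first endpoint is read as
-- an index into colors (negative = from the end), so it must be a valid Python index;
-- with ≤ 1 edge the loop body never runs and colors is never touched.
def Pre_req (edges : List (Int × Int)) (n : Int) (colors : List Int) : Prop :=
  2 ≤ edges.length → ∀ e ∈ edges, PySem.Raise.InRange colors.length e.1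
instance (edges : List (Int × Int)) (n : Int) (colors : List Int) : Decidable (Pre_req edges n colors) := by unfold Pre_req; infer_instance
def pvWitness_req : (List (Int × Int)) × Int × List Int := ([(0, 1), (1, 0), (-2, 5)], 2, [1, -1])
def Spec_req (edges : List (Int × Int)) (n : Int) (colors : List Int) (out : (List (Int × Int)) × (List (Int × Int))) : Prop := out = req_alt edges n colors
instance (edges : List (Int × Int)) (n : Int) (colors : List Int) (out : (List (Int × Int)) × (List (Int × Int))) : Decidable (Spec_req edges n colors out) := by unfold Spec_req; infer_instance

-- ===== CLAIM (what is proved, stated in full; the proofs are below) =====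
def Claim_equal_req : Prop := ∀ (edges : List (Int × Int)) (n : Int) (colors : List Int), Dom_req edges n colors → Pre_req edges n colors → Spec_req edges n colors (req edges n colors)

-- ===== LEMMAS AND PROOFS =====

-- orientation of one edge (B applies it once per edge; A inline to both edges of a pair)
def orientEdge (colors : List Int) (p : Int × Int) : Int × Int :=
  if PySem.List.pyGetD colors p.1 0 < 0 then (p.2, p.1) else p

-- classification of one oriented consecutive pair (A's loop body)
def classifyPair (acc : (List (Int × Int)) × (List (Int × Int))) (q : (Int × Int) × (Int × Int)) :
    (List (Int × Int)) × (List (Int × Int)) :=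
  if q.1.1 == q.2.1 then (acc.1, acc.2 ++ [(q.1.2, q.2.2)]) else (acc.1 ++ [(q.1.1, q.2.1)], acc.2)

-- pure form of B's run-building loop body
def runStep (runs : List (Int × List Int)) (p : Int × Int) : List (Int × List Int) :=
  match runs.getLast? with
  | some last =>
      if last.1 == p.1 then runs.dropLast ++ [(last.1, last.2 ++ [p.2])]
      else runs ++ [(p.1, [p.2])]
  | none => [(p.1, [p.2])]

-- functional form of B's run-building loop
def groupGo (h : Int) (ts : List Int) : List (Int × Int) → List (Int × List Int)
  | [] => [(h, ts)]
  | e :: rest => if e.1 = h then groupGo h (ts ++ [e.2]) rest else (h, ts) :: groupGo e.1 [e.2] rest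

-- consecutive pairs of a list
def adj {α : Type} : List α → List (α × α)
  | a :: b :: r => (a, b) :: adj (b :: r)
  | _ => []

theorem adj_single {α : Type} (a : α) : adj [a] = [] := rfl
theorem adj_cons2 {α : Type} (a b : α) (r : List α) : adj (a :: b :: r) = (a, b) :: adj (b :: r) := rfl

theorem adj_eq_zipTail {α : Type} : ∀ (l : List α), adj l = l.zip l.tail := by
  intro l
  induction l with
  | nil => rfl
  | cons a t ih =>
    cases t with
    | nil => rfl
    | cons b r => simp [adj_cons2, List.zip_cons_cons, ih]

theorem adj_concat2 {α : Type} : ∀ (l : List α) (x y : α),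
    adj (l ++ [x, y]) = adj (l ++ [x]) ++ [(x, y)] := by
  intro l
  induction l with
  | nil => intro x y; rfl
  | cons a t ih =>
    intro x y
    cases t with
    | nil => rfl
    | cons b r =>
      have := ih x y
      simp only [List.cons_append, adj_cons2] at this ⊢
      rw [this]

-- a map over 'range(len(l)-1)' reading l[i], l[i+1] is the consecutive-pairs list
theorem mapRange_adj {α : Type} (d : α) (l : List α) :
    (List.range (l.length - 1)).map (fun i => (l.getD i d, l.getD (i + 1) d)) = adj l := by
  rw [adj_eq_zipTail]
  apply List.ext_getElem
  · simp [List.length_zip, List.length_tail]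
  · intro i h1 h2
    have hz : i < min l.length l.tail.length := by
      simpa [List.length_zip] using h2
    have hi : i < l.length := by simp [List.length_tail] at hz; omega
    have hi1 : i + 1 < l.length := by simp [List.length_tail] at hz; omega
    simp [List.getElem_zip, List.getElem_tail, List.getD,
      List.getElem?_eq_getElem hi, List.getElem?_eq_getElem hi1]

-- a fold over 'range(len(l))' reading l[i] is a fold over l
theorem foldl_range_getD {α β : Type} (g : β → α → β) (d : α) :
    ∀ (l : List α) (init : β),
      (List.range l.length).foldl (fun acc i => g acc (l.getD i d)) init = l.foldl g init := by
  intro l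
  induction l with
  | nil => intro init; simp
  | cons a t ih =>
    intro init
    rw [List.length_cons, List.range_succ_eq_map, List.foldl_cons, List.foldl_map]
    simpa using ih (g init a)

-- the classify fold produces the two filtered projections of the pair list
theorem classifyPair_fold :
    ∀ (m : List ((Int × Int) × (Int × Int))) (r1 r2 : List (Int × Int)),
      m.foldl classifyPair (r1, r2)
        = (r1 ++ (m.filter (fun q => q.1.1 ≠ q.2.1)).map (fun q => (q.1.1, q.2.1)),
           r2 ++ (m.filter (fun q => q.1.1 == q.2.1)).map (fun q => (q.1.2, q.2.2))) := by
  intro m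
  induction m with
  | nil => intro r1 r2; simp
  | cons q t ih =>
    intro r1 r2
    by_cases h : q.1.1 = q.2.1 <;>
      simp [classifyPair, h, ih, List.append_assoc]

-- B's fold equals groupGo
theorem fold_groupGo :
    ∀ (rest : List (Int × Int)) (rs : List (Int × List Int)) (h : Int) (ts : List Int),
      rest.foldl runStep (rs ++ [(h, ts)]) = rs ++ groupGo h ts rest := by
  intro rest
  induction rest with
  | nil => intro rs h ts; simp [groupGo]
  | cons e t ih =>
    intro rs h ts
    rw [List.foldl_cons]
    have hl : (rs ++ [(h, ts)]).getLast? = some (h, ts) := by simp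
    by_cases he : e.1 = h
    · have hb : ((h, ts).1 == e.1) = true := by simp [he]
      simp only [runStep, hl, hb, if_true, List.dropLast_concat]
      rw [ih rs h (ts ++ [e.2])]
      simp [groupGo, he]
    · have hb : ((h, ts).1 == e.1) = false := by simp; intro hc; exact he hc.symm
      simp only [runStep, hl, hb, Bool.false_eq_true, if_false]
      rw [List.append_assoc, ← List.append_assoc rs, ih (rs ++ [(h, ts)]) e.1 [e.2]]
      simp [groupGo, he, List.append_assoc]

-- groupGo always yields a nonempty list starting with head h
theorem groupGo_head :
    ∀ (rest : List (Int × Int)) (h : Int) (ts : List Int),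
      ∃ l rs, groupGo h ts rest = (h, l) :: rs := by
  intro rest
  induction rest with
  | nil => intro h ts; exact ⟨ts, [], rfl⟩
  | cons e t ih =>
    intro h ts
    by_cases he : e.1 = h
    · obtain ⟨l, rs, hgo⟩ := ih h (ts ++ [e.2])
      exact ⟨l, rs, by simp [groupGo, he, hgo]⟩
    · exact ⟨ts, groupGo e.1 [e.2] t, by simp [groupGo, he]⟩

-- key lemma: the run grouping carries exactly A's two classified projections
theorem groupGo_spec :
    ∀ (rest : List (Int × Int)) (h t : Int) (ts : List Int),
      (adj (groupGo h (ts ++ [t]) rest)).map (fun q => (q.1.1, q.2.1))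
        = ((adj ((h, t) :: rest)).filter (fun q => q.1.1 ≠ q.2.1)).map (fun q => (q.1.1, q.2.1))
      ∧ (groupGo h (ts ++ [t]) rest).flatMap (fun r => adj r.2)
        = adj (ts ++ [t]) ++ ((adj ((h, t) :: rest)).filter (fun q => q.1.1 == q.2.1)).map (fun q => (q.1.2, q.2.2)) := by
  intro rest
  induction rest with
  | nil =>
    intro h t ts
    constructor
    · simp [groupGo, adj_single]
    · simp [groupGo, adj_single]
  | cons e rest' ih =>
    intro h t ts
    obtain ⟨e1, e2⟩ := e
    by_cases he : e1 = h
    · subst he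
      obtain ⟨ih1, ih2⟩ := ih e1 e2 (ts ++ [t])
      have hgo : groupGo e1 (ts ++ [t]) ((e1, e2) :: rest') = groupGo e1 ((ts ++ [t]) ++ [e2]) rest' := by
        simp [groupGo]
      constructor
      · rw [hgo, ih1, adj_cons2]
        simp [List.filter_cons]
      · rw [hgo, ih2, show (ts ++ [t]) ++ [e2] = ts ++ [t, e2] by simp, adj_concat2, adj_cons2]
        simp [List.filter_cons, List.append_assoc]
    · have hne : ¬ ((h : Int) = e1) := fun hc => he hc.symm
      obtain ⟨ih1, ih2⟩ := ih e1 e2 []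
      simp only [List.nil_append] at ih1 ih2
      have hgo : groupGo h (ts ++ [t]) ((e1, e2) :: rest') = (h, ts ++ [t]) :: groupGo e1 [e2] rest' := by
        simp [groupGo, he]
      obtain ⟨l, rs, hhd⟩ := groupGo_head rest' e1 [e2]
      constructor
      · rw [hgo, hhd, adj_cons2, ← hhd, List.map_cons, ih1, adj_cons2]
        simp [List.filter_cons, hne]
      · rw [hgo, List.flatMap_cons, ih2, adj_cons2]
        simp [List.filter_cons, hne, adj_single]

-- B's req1 comprehension is the head-pairs map over the runs' consecutive pairs
theorem mapRange_heads (runs : List (Int × List Int)) :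
    (List.range (runs.length - 1)).map
        (fun i => ((runs.getD i (0, [])).1, (runs.getD (i + 1) (0, [])).1))
      = (adj runs).map (fun q => (q.1.1, q.2.1)) := by
  rw [← mapRange_adj (((0 : Int), ([] : List Int))) runs, List.map_map]
  rfl

-- the ports agree on every input (the getD/pyGetD defaults make both total)
theorem req_eq (edges : List (Int × Int)) (n : Int) (colors : List Int) :
    req edges n colors = req_alt edges n colors := by
  by_cases hlen : edges.length < 2
  · have h1 : edges.length - 1 = 0 := by omega
    simp [req, req_alt, hlen, h1]
  · -- A as a classify fold over the consecutive pairs of the oriented list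
    have lenT : edges.tail.length = edges.length - 1 := List.length_tail
    have lenP : (edges.zip edges.tail).length = edges.length - 1 := by
      simp [List.length_zip, lenT]
    have stepA : req edges n colors
        = (edges.zip edges.tail).foldl
            (fun acc q => classifyPair acc (orientEdge colors q.1, orientEdge colors q.2)) ([], []) := by
      rw [← foldl_range_getD (fun acc q => classifyPair acc (orientEdge colors q.1, orientEdge colors q.2))
            ((0, 0), (0, 0)) (edges.zip edges.tail) ([], [])]
      rw [lenP]
      apply PySem.List.foldl_congr_mem
      intro acc i hi
      have hi' : i < edges.length - 1 := List.mem_range.mp hi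
      have hz : (edges.zip edges.tail).getD i ((0, 0), (0, 0))
          = (edges.getD i (0, 0), edges.getD (i + 1) (0, 0)) := by
        rw [List.getD_eq_getElem _ _ (by omega : i < (edges.zip edges.tail).length),
            List.getD_eq_getElem _ _ (by omega : i < edges.length),
            List.getD_eq_getElem _ _ (by omega : i + 1 < edges.length),
            List.getElem_zip]
        congr 1
        rw [List.getElem_tail]
      rw [hz]
      rfl
    -- the oriented list and its shape
    obtain ⟨p, erest, hE⟩ : ∃ p erest, edges = p :: erest := by
      cases edges with
      | nil => simp at hlen
      | cons p erest => exact ⟨p, erest, rfl⟩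
    set o := edges.map (orientEdge colors) with ho
    have hoE : o = orientEdge colors p :: erest.map (orientEdge colors) := by
      rw [ho, hE]; rfl
    have hAfold : req edges n colors = (adj o).foldl classifyPair ([], []) := by
      rw [stepA, ← List.foldl_map, adj_eq_zipTail]
      congr 1
      rw [show (fun q : (Int × Int) × (Int × Int) => (orientEdge colors q.1, orientEdge colors q.2))
            = Prod.map (orientEdge colors) (orientEdge colors) from rfl]
      have htl : o.tail = edges.tail.map (orientEdge colors) := by
        rw [ho, hE]; rfl
      rw [htl, ho, List.zip_map]
    -- B's runs are groupGo over the tail of the oriented list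
    have hstep : ∀ (runs : List (Int × List Int)) (q : Int × Int),
        (fun runs (q : Int × Int) =>
          let ht := if PySem.List.pyGetD colors q.1 0 < 0 then (q.2, q.1) else q
          match runs.getLast? with
          | some last =>
              if last.1 == ht.1 then runs.dropLast ++ [(last.1, last.2 ++ [ht.2])]
              else runs ++ [(ht.1, [ht.2])]
          | none => [(ht.1, [ht.2])]) runs q = runStep runs (orientEdge colors q) := by
      intro runs q; rfl
    have hruns : edges.foldl
        (fun runs q =>
          let ht := if PySem.List.pyGetD colors q.1 0 < 0 then (q.2, q.1) else q
          match runs.getLast? with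
          | some last =>
              if last.1 == ht.1 then runs.dropLast ++ [(last.1, last.2 ++ [ht.2])]
              else runs ++ [(ht.1, [ht.2])]
          | none => [(ht.1, [ht.2])]) ([] : List (Int × List Int))
        = groupGo (orientEdge colors p).1 [(orientEdge colors p).2] (erest.map (orientEdge colors)) := by
      have : edges.foldl
          (fun runs q =>
            let ht := if PySem.List.pyGetD colors q.1 0 < 0 then (q.2, q.1) else q
            match runs.getLast? with
            | some last =>
                if last.1 == ht.1 then runs.dropLast ++ [(last.1, last.2 ++ [ht.2])]
                else runs ++ [(ht.1, [ht.2])]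
            | none => [(ht.1, [ht.2])]) ([] : List (Int × List Int))
          = o.foldl runStep [] := by
        rw [ho, List.foldl_map]
        rfl
      rw [this, hoE, List.foldl_cons]
      have h0 : runStep [] (orientEdge colors p)
          = [] ++ [((orientEdge colors p).1, [(orientEdge colors p).2])] := rfl
      rw [h0, fold_groupGo]
      simp
    -- assemble
    rw [hAfold, classifyPair_fold]
    unfold req_alt
    rw [if_neg hlen]
    simp only [hruns]
    obtain ⟨c1, c2⟩ := groupGo_spec (erest.map (orientEdge colors))
      (orientEdge colors p).1 (orientEdge colors p).2 []
    simp only [List.nil_append] at c1 c2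
    have hadjo : adj o = adj (((orientEdge colors p).1, (orientEdge colors p).2) :: erest.map (orientEdge colors)) := by
      rw [hoE]
    simp only [Prod.mk.injEq]
    constructor
    · rw [mapRange_heads, c1, ← hadjo]
      simp
    · rw [show (fun r : Int × List Int =>
          (List.range (r.2.length - 1)).map (fun j => (r.2.getD j 0, r.2.getD (j + 1) 0)))
          = (fun r : Int × List Int => adj r.2) from funext (fun r => mapRange_adj 0 r.2)]
      rw [c2, ← hadjo]
      simp [adj_single]

-- ===== VERDICT (by name: the statement is the Claim_ definition above) =====
theorem req_spec : Claim_equal_req := by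
  intro edges n colors _ _
  unfold Spec_req
  exact req_eq edges n colors
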